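-- pv_equiv track=rewrite | github.com/SlanyCukr/bugbounty-mcp-server | src/rest_api_server/utils/parameter_utils.py | validate_string_param
-- ===== SOURCE A (Python) =====
-- from typing import Any
--
-- def validate_string_param(
--     value: Any, param_name: str, max_length: int = 1000
-- ) -> str:
--     """Validate and clean string parameters."""
--     if not value:
--         return ""
--
--     value = str(value).strip()
--
--     if len(value) > max_length:
--         raise ValueError(f"{param_name} exceeds maximum length of {max_length}")
--
--     # Remove potentially dangerous characters
--     dangerous_chars = [";", "&", "|", "`", "$", "(", ")", "{", "}", "<", ">"]
--     for char in dangerous_chars: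
--         if char in value:
--             value = value.replace(char, "")
--
--     return value
-- ===== SOURCE B (Python) =====
-- from typing import Any
--
-- _BANNED = {";", "&", "|", "`", "$", "(", ")", "{", "}", "<", ">"}
--
-- def validate_string_param(
--     value: Any, param_name: str, max_length: int = 1000
-- ) -> str:
--     """Validate and clean string parameters (single-pass filter)."""
--     if not value:
--         return ""
--
--     value = str(value).strip()
--
--     if len(value) > max_length:
--         raise ValueError(f"{param_name} exceeds maximum length of {max_length}")
--
--     return "".join(c for c in value if c not in _BANNED)
-- ===== Notes on version B (the rewrite author's own statement) =====
-- stated objective: simpler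
-- what changed: Replaced the 11-iteration replace loop (each 'in' test and str.replace rescanning the whole string) by one single pass over the string that drops banned characters via set membership.
import Mathlib
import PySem

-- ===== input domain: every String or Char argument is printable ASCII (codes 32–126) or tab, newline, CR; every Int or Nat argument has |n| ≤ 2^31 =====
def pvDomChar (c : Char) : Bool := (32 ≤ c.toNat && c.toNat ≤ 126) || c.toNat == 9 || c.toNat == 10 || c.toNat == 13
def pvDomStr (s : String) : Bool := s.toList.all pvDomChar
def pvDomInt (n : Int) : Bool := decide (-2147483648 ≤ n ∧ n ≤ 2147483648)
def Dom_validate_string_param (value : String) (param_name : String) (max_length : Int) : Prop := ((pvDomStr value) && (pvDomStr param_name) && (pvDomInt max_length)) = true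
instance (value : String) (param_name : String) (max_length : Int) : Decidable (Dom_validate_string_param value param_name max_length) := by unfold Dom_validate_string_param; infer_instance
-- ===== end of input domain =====

-- B replaces A's 11-iteration replace loop by one single pass dropping banned characters; proved equal on Pre_ (inputs where A does not raise ValueError).

-- ===== PORT A =====
def dangerousCharsA : List String := [";", "&", "|", "`", "$", "(", ")", "{", "}", "<", ">"]

-- literal port of A; on inputs where Python raises ValueError (excluded by Pre_) it returns ""
def validate_string_param (value : String) (param_name : String) (max_length : Int) : String :=
  if value = "" then ""
  else
    let v := PySem.Str.strip value
    if (PySem.Str.len v : Int) > max_length then ""   -- Python raises ValueError here; outside Pre_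
    else
      dangerousCharsA.foldl
        (fun acc ch => if PySem.Str.isIn ch acc then PySem.Str.replace acc ch "" else acc) v

-- ===== PORT B =====
def bannedCharsB : List Char := [';', '&', '|', '`', '$', '(', ')', '{', '}', '<', '>']

def validate_string_param_alt (value : String) (param_name : String) (max_length : Int) : String :=
  if value = "" then ""
  else
    let v := PySem.Str.strip value
    if (PySem.Str.len v : Int) > max_length then ""   -- Python raises ValueError here; outside Pre_
    else String.ofList (v.toList.filter (fun c => !(bannedCharsB.contains c)))

-- ===== PRECONDITION & SPEC =====
-- Pre_ excludes exactly the inputs where A raises ValueError (stripped value longer than max_length).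
def Pre_validate_string_param (value : String) (param_name : String) (max_length : Int) : Prop :=
  value = "" ∨ (PySem.Str.len (PySem.Str.strip value) : Int) ≤ max_length
instance (value : String) (param_name : String) (max_length : Int) : Decidable (Pre_validate_string_param value param_name max_length) := by unfold Pre_validate_string_param; infer_instance

def pvWitness_validate_string_param : String × String × Int := ("  ls (a;b) &x  ", "p", 1000)

def Spec_validate_string_param (value : String) (param_name : String) (max_length : Int) (out : String) : Prop := out = validate_string_param_alt value param_name max_length
instance (value : String) (param_name : String) (max_length : Int) (out : String) : Decidable (Spec_validate_string_param value param_name max_length out) := by unfold Spec_validate_string_param; infer_instance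

-- ===== CLAIM (what is proved, stated in full; the proofs are below) =====
def Claim_equal_validate_string_param : Prop := ∀ (value : String) (param_name : String) (max_length : Int), Dom_validate_string_param value param_name max_length → Pre_validate_string_param value param_name max_length → Spec_validate_string_param value param_name max_length (validate_string_param value param_name max_length)

-- ===== LEMMAS AND PROOFS =====

-- replace.go with a single-char pattern and empty replacement is a filter
theorem replace_go_single (c : Char) : ∀ (fuel : Nat) (l acc : List Char), l.length ≤ fuel →
    PySem.Chars.replace.go [c] [] fuel l acc = acc.reverse ++ l.filter (· != c) := by
  intro fuel
  induction fuel with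
  | zero =>
    intro l acc h
    have : l = [] := List.eq_nil_of_length_eq_zero (Nat.le_zero.mp h)
    subst this
    simp [PySem.Chars.replace.go]
  | succ n ih =>
    intro l acc h
    cases l with
    | nil => simp [PySem.Chars.replace.go]
    | cons x t =>
      simp only [PySem.Chars.replace.go]
      by_cases hx : x = c
      · subst hx
        have : List.isPrefixOf [x] (x :: t) = true := by simp [List.isPrefixOf]
        simp only [this, if_pos, List.length_cons, List.length_nil,
          List.drop_succ_cons, List.drop_zero, List.reverse_nil, List.nil_append]
        rw [ih t acc (by simpa using Nat.le_of_succ_le_succ h)]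
        simp
      · have : List.isPrefixOf [c] (x :: t) = false := by
          simp [List.isPrefixOf]; exact fun hh => absurd hh.symm hx
        simp only [this]
        rw [ih t (x :: acc) (by simpa using Nat.le_of_succ_le_succ h)]
        simp [hx]

theorem replace_single (c : Char) (l : List Char) :
    PySem.Chars.replace l [c] [] = l.filter (· != c) := by
  simp [PySem.Chars.replace, replace_go_single c l.length l [] (le_refl _)]

-- one step of A's loop removes the character, whether or not the 'in' test fires
theorem step_eq (c : Char) (s : String) :
    (if PySem.Str.isIn (String.ofList [c]) s then PySem.Str.replace s (String.ofList [c]) "" else s)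
      = String.ofList (s.toList.filter (· != c)) := by
  by_cases h : PySem.Str.isIn (String.ofList [c]) s = true
  · rw [if_pos h]
    simp [PySem.Str.replace, replace_single]
  · rw [if_neg h]
    have hnot : c ∉ s.toList := by
      intro hc
      apply h
      rw [PySem.Str.isIn_iff_infix]
      simp only [String.toList_ofList]
      obtain ⟨l1, l2, he⟩ := List.mem_iff_append.mp hc
      exact ⟨l1, l2, by rw [he]; simp⟩
    have : s.toList.filter (· != c) = s.toList := by
      apply List.filter_eq_self.mpr
      intro a ha
      simp only [bne_iff_ne, ne_eq]
      intro he; exact hnot (he ▸ ha)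
    rw [this, String.ofList_toList]

-- A's fold over a list of single-character strings is one filter
theorem fold_chars (cs : List Char) (s : String) :
    (cs.map (fun c => String.ofList [c])).foldl
        (fun acc ch => if PySem.Str.isIn ch acc then PySem.Str.replace acc ch "" else acc) s
      = String.ofList (s.toList.filter (fun x => !(cs.contains x))) := by
  induction cs generalizing s with
  | nil => simp
  | cons c cs ih =>
    simp only [List.map_cons, List.foldl_cons]
    rw [step_eq c s, ih]
    simp only [String.toList_ofList, List.filter_filter]
    congr 1
    apply List.filter_congr
    intro x _
    by_cases hx : x = c <;> simp [hx, Bool.and_comm]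

-- ===== VERDICT (by name: the statement is the Claim_ definition above) =====
theorem validate_string_param_spec : Claim_equal_validate_string_param := by
  intro value param_name max_length _ hpre
  unfold Spec_validate_string_param validate_string_param validate_string_param_alt
  by_cases hv : value = ""
  · simp [hv]
  · rw [if_neg hv, if_neg hv]
    have hlen : ¬ ((PySem.Str.len (PySem.Str.strip value) : Int) > max_length) := by
      rcases hpre with h | h
      · exact absurd h hv
      · omega
    rw [if_neg hlen, if_neg hlen]
    have hd : dangerousCharsA = bannedCharsB.map (fun c => String.ofList [c]) := by
      decide
    rw [hd, fold_chars]
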